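-- pv_equiv track=rewrite | github.com/WebF0x/ProjectEulerSolutions | src/euler_23.py | sum_of_all_positive_integers_that_are_sum_of_candidates
-- ===== SOURCE A (Python) =====
-- def sum_of_all_positive_integers_that_are_sum_of_candidates(max_sum, candidate_numbers):
--     sums_of_two_candidate_numbers = set()
--     for index, candidate_number in enumerate(candidate_numbers):
--         candidate_number_partners = candidate_numbers[index:]
--         for candidate_number_partner in candidate_number_partners:
--             sum_of_two_candidates = candidate_number + candidate_number_partner
--             if sum_of_two_candidates <= max_sum:
--                 sums_of_two_candidate_numbers.add(sum_of_two_candidates)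
--     return sum(sums_of_two_candidate_numbers)
-- ===== SOURCE B (Python) =====
-- def sum_of_all_positive_integers_that_are_sum_of_candidates(max_sum, candidate_numbers):
--     values = sorted(set(candidate_numbers))
--     total = 0
--     seen = set()
--     for x in values:
--         for y in values:
--             s = x + y
--             if s > max_sum:
--                 break
--             if s not in seen:
--                 seen.add(s)
--                 total += s
--     return total
-- ===== Notes on version B (the rewrite author's own statement) =====
-- stated objective: alternative
-- what changed: B deduplicates and sorts the candidate values once, then scans pairs of distinct values with an early break as soon as a sum exceeds max_sum, accumulating a running total of new sums instead of building the full set over suffix slices of the raw list and summing at the end.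
import Mathlib
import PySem

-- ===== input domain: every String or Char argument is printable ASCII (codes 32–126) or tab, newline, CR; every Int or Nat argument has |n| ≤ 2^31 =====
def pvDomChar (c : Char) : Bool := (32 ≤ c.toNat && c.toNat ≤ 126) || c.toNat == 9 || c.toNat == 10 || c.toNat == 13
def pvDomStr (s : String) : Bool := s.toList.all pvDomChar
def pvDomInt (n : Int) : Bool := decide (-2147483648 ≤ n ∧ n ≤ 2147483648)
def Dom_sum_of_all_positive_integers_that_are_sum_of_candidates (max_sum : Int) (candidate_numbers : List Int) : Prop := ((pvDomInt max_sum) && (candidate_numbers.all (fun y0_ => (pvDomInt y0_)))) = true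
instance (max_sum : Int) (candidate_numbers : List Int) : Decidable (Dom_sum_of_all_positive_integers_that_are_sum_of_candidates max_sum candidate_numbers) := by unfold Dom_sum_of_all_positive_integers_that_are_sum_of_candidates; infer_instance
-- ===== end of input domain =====

-- B deduplicates+sorts the candidate values and scans pairs of distinct values with an early
-- break once a sum exceeds max_sum, accumulating a running total of new sums (alternative algorithm; cheaper on duplicate-heavy or small-max_sum inputs).

-- ===== PORT A =====
def sum_of_all_positive_integers_that_are_sum_of_candidates (max_sum : Int) (candidate_numbers : List Int) : Int :=
  let sums_of_two_candidate_numbers : PySem.Set Int :=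
    (PySem.List.enumerate candidate_numbers).foldl (fun acc p =>
      let candidate_number_partners := PySem.List.slice candidate_numbers (some p.1) none
      candidate_number_partners.foldl (fun a partner =>
        let s := p.2 + partner
        if s <= max_sum then PySem.Set.add a s else a) acc)
      PySem.Set.empty
  sums_of_two_candidate_numbers.sum

-- ===== PORT B =====
-- inner loop over `ys` for a fixed x: breaks as soon as x+y > max_sum; state = (seen, total)
def pvInnerB (max_sum x : Int) (ys : List Int) (st : PySem.Set Int × Int) : PySem.Set Int × Int :=
  match ys with
  | [] => st
  | y :: t =>
      let s := x + y
      if max_sum < s then st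
      else if PySem.Set.contains st.1 s then pvInnerB max_sum x t st
      else pvInnerB max_sum x t (PySem.Set.add st.1 s, st.2 + s)

def sum_of_all_positive_integers_that_are_sum_of_candidates_alt (max_sum : Int) (candidate_numbers : List Int) : Int :=
  let values := PySem.List.sorted (PySem.Set.ofList candidate_numbers) (fun v => v) false
  (values.foldl (fun st x => pvInnerB max_sum x values st) ((PySem.Set.empty : PySem.Set Int), 0)).2

-- ===== PRECONDITION & SPEC =====
def Spec_sum_of_all_positive_integers_that_are_sum_of_candidates (max_sum : Int) (candidate_numbers : List Int) (out : Int) : Prop := out = sum_of_all_positive_integers_that_are_sum_of_candidates_alt max_sum candidate_numbers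
instance (max_sum : Int) (candidate_numbers : List Int) (out : Int) : Decidable (Spec_sum_of_all_positive_integers_that_are_sum_of_candidates max_sum candidate_numbers out) := by unfold Spec_sum_of_all_positive_integers_that_are_sum_of_candidates; infer_instance

-- ===== CLAIM (what is proved, stated in full; the proofs are below) =====
def Claim_equal_sum_of_all_positive_integers_that_are_sum_of_candidates : Prop := ∀ (max_sum : Int) (candidate_numbers : List Int), Dom_sum_of_all_positive_integers_that_are_sum_of_candidates max_sum candidate_numbers → Spec_sum_of_all_positive_integers_that_are_sum_of_candidates max_sum candidate_numbers (sum_of_all_positive_integers_that_are_sum_of_candidates max_sum candidate_numbers)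

-- ===== LEMMAS AND PROOFS =====

-- A-side helpers: A's loop over enumerate+suffix slices, rephrased as recursion on suffixes
def pvInnerA (max_sum x : Int) (ys : List Int) (acc : PySem.Set Int) : PySem.Set Int :=
  ys.foldl (fun a partner => if x + partner <= max_sum then PySem.Set.add a (x + partner) else a) acc

def pvGoA (max_sum : Int) (l : List Int) (acc : PySem.Set Int) : PySem.Set Int :=
  match l with
  | [] => acc
  | x :: t => pvGoA max_sum t (pvInnerA max_sum x (x :: t) acc)

theorem mem_innerA (max_sum x : Int) (ys : List Int) (acc : PySem.Set Int) (v : Int) :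
    v ∈ pvInnerA max_sum x ys acc ↔ v ∈ acc ∨ ∃ y ∈ ys, x + y ≤ max_sum ∧ v = x + y := by
  induction ys generalizing acc with
  | nil => simp [pvInnerA]
  | cons y t ih =>
    simp only [pvInnerA, List.foldl_cons] at *
    rw [ih]
    by_cases h : x + y ≤ max_sum
    · simp only [h, if_pos, PySem.Set.mem_add, List.mem_cons]
      constructor
      · rintro ((hv | rfl) | ⟨b, hb, hle, rfl⟩)
        · exact Or.inl hv
        · exact Or.inr ⟨y, Or.inl rfl, h, rfl⟩
        · exact Or.inr ⟨b, Or.inr hb, hle, rfl⟩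
      · rintro (hv | ⟨b, (rfl | hb), hle, rfl⟩)
        · exact Or.inl (Or.inl hv)
        · exact Or.inl (Or.inr rfl)
        · exact Or.inr ⟨b, hb, hle, rfl⟩
    · simp only [h, if_neg, not_false_iff, List.mem_cons]
      constructor
      · rintro (hv | ⟨b, hb, hle, rfl⟩)
        · exact Or.inl hv
        · exact Or.inr ⟨b, Or.inr hb, hle, rfl⟩
      · rintro (hv | ⟨b, (rfl | hb), hle, rfl⟩)
        · exact Or.inl hv
        · exact absurd hle h
        · exact Or.inr ⟨b, hb, hle, rfl⟩

theorem nodup_innerA (max_sum x : Int) (ys : List Int) (acc : PySem.Set Int) (h : acc.Nodup) :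
    (pvInnerA max_sum x ys acc).Nodup := by
  induction ys generalizing acc with
  | nil => simpa [pvInnerA] using h
  | cons y t ih =>
    simp only [pvInnerA, List.foldl_cons] at *
    split
    · exact ih _ (PySem.Set.nodup_add _ _ h)
    · exact ih _ h

theorem mem_goA (max_sum : Int) (l : List Int) (acc : PySem.Set Int) (v : Int) :
    v ∈ pvGoA max_sum l acc ↔ v ∈ acc ∨ ∃ a ∈ l, ∃ b ∈ l, a + b ≤ max_sum ∧ v = a + b := by
  induction l generalizing acc with
  | nil => simp [pvGoA]
  | cons x t ih =>
    simp only [pvGoA]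
    rw [ih, mem_innerA]
    constructor
    · rintro ((hv | ⟨y, hy, hle, rfl⟩) | ⟨a, ha, b, hb, hle, rfl⟩)
      · exact Or.inl hv
      · exact Or.inr ⟨x, List.mem_cons_self, y, hy, hle, rfl⟩
      · exact Or.inr ⟨a, List.mem_cons_of_mem _ ha, b, List.mem_cons_of_mem _ hb, hle, rfl⟩
    · rintro (hv | ⟨a, ha, b, hb, hle, rfl⟩)
      · exact Or.inl (Or.inl hv)
      · rcases List.mem_cons.mp ha with rfl | ha2
        · exact Or.inl (Or.inr ⟨b, hb, hle, rfl⟩)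
        · rcases List.mem_cons.mp hb with rfl | hb2
          · exact Or.inl (Or.inr ⟨a, List.mem_cons_of_mem _ ha2, by omega, by omega⟩)
          · exact Or.inr ⟨a, ha2, b, hb2, hle, rfl⟩

theorem nodup_goA (max_sum : Int) (l : List Int) (acc : PySem.Set Int) (h : acc.Nodup) :
    (pvGoA max_sum l acc).Nodup := by
  induction l generalizing acc with
  | nil => simpa [pvGoA] using h
  | cons x t ih => exact ih _ (nodup_innerA _ _ _ _ h)

theorem A_eq_goA (max_sum : Int) (c : List Int) :
    sum_of_all_positive_integers_that_are_sum_of_candidates max_sum c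
      = (pvGoA max_sum c PySem.Set.empty).sum := by
  have key : ∀ (l : List Int) (k : Nat) (acc : PySem.Set Int), c.drop k = l →
      (PySem.List.enumerate l ((k : Nat) : Int)).foldl (fun acc p =>
        (PySem.List.slice c (some p.1) none).foldl (fun a partner =>
          if p.2 + partner ≤ max_sum then PySem.Set.add a (p.2 + partner) else a) acc) acc
        = pvGoA max_sum l acc := by
    intro l
    induction l with
    | nil => intro k acc _; simp [PySem.List.enumerate_nil, pvGoA]
    | cons x t ih =>
      intro k acc hd
      have hd' : c.drop (k + 1) = t := by
        have h1 := congrArg (List.drop 1) hd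
        simpa [List.drop_drop, Nat.add_comm] using h1
      rw [PySem.List.enumerate_cons, List.foldl_cons]
      have hcast : ((k : Nat) : Int) + 1 = (((k + 1 : Nat)) : Int) := by push_cast; ring
      rw [hcast, ih (k + 1) _ hd']
      simp only [pvGoA]
      congr 1
      rw [PySem.List.slice_from_natCast, hd]
      rfl
  have h0 := key c 0 PySem.Set.empty (by simp)
  simp only [Nat.cast_zero] at h0
  simp only [sum_of_all_positive_integers_that_are_sum_of_candidates]
  rw [h0]

theorem mem_innerB (max_sum x : Int) (ys : List Int) (st : PySem.Set Int × Int)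
    (hs : ys.Pairwise (· ≤ ·)) (v : Int) :
    v ∈ (pvInnerB max_sum x ys st).1 ↔ v ∈ st.1 ∨ ∃ y ∈ ys, x + y ≤ max_sum ∧ v = x + y := by
  induction ys generalizing st with
  | nil => simp [pvInnerB]
  | cons y t ih =>
    rcases List.pairwise_cons.mp hs with ⟨hy, ht⟩
    simp only [pvInnerB]
    by_cases h : max_sum < x + y
    · rw [if_pos h]
      constructor
      · exact Or.inl
      · rintro (hv | ⟨b, hb, hle, rfl⟩)
        · exact hv
        · rcases List.mem_cons.mp hb with rfl | hb
          · omega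
          · have := hy b hb; omega
    · rw [if_neg h]
      by_cases hc : PySem.Set.contains st.1 (x + y) = true
      · rw [if_pos hc]
        rw [ih _ ht]
        have hmem : x + y ∈ st.1 := by simpa using hc
        constructor
        · rintro (hv | ⟨b, hb, hle, rfl⟩)
          · exact Or.inl hv
          · exact Or.inr ⟨b, List.mem_cons_of_mem _ hb, hle, rfl⟩
        · rintro (hv | ⟨b, hb, hle, rfl⟩)
          · exact Or.inl hv
          · rcases List.mem_cons.mp hb with rfl | hb
            · exact Or.inl hmem
            · exact Or.inr ⟨b, hb, hle, rfl⟩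
      · rw [if_neg hc]
        rw [ih _ ht]
        simp only [PySem.Set.mem_add, List.mem_cons]
        constructor
        · rintro ((hv | rfl) | ⟨b, hb, hle, rfl⟩)
          · exact Or.inl hv
          · exact Or.inr ⟨y, Or.inl rfl, by omega, rfl⟩
          · exact Or.inr ⟨b, Or.inr hb, hle, rfl⟩
        · rintro (hv | ⟨b, (rfl | hb), hle, rfl⟩)
          · exact Or.inl (Or.inl hv)
          · exact Or.inl (Or.inr rfl)
          · exact Or.inr ⟨b, hb, hle, rfl⟩

theorem inv_innerB (max_sum x : Int) (ys : List Int) (st : PySem.Set Int × Int)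
    (h1 : st.1.Nodup) (h2 : st.2 = st.1.sum) :
    (pvInnerB max_sum x ys st).1.Nodup ∧ (pvInnerB max_sum x ys st).2 = (pvInnerB max_sum x ys st).1.sum := by
  induction ys generalizing st with
  | nil => exact ⟨h1, h2⟩
  | cons y t ih =>
    simp only [pvInnerB]
    by_cases h : max_sum < x + y
    · rw [if_pos h]; exact ⟨h1, h2⟩
    · rw [if_neg h]
      by_cases hc : PySem.Set.contains st.1 (x + y) = true
      · rw [if_pos hc]; exact ih _ h1 h2
      · rw [if_neg hc]
        have hnm : x + y ∉ st.1 := by simpa using hc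
        have hadd : PySem.Set.add st.1 (x + y) = st.1 ++ [x + y] := by
          simp [PySem.Set.add, hnm]
        refine ih (PySem.Set.add st.1 (x + y), st.2 + (x + y)) ?_ ?_
        · exact PySem.Set.nodup_add _ _ h1
        · simp [hadd, h2]

theorem mem_outerB (max_sum : Int) (values l : List Int) (st : PySem.Set Int × Int)
    (hs : values.Pairwise (· ≤ ·)) (v : Int) :
    v ∈ (l.foldl (fun st x => pvInnerB max_sum x values st) st).1 ↔
      v ∈ st.1 ∨ ∃ a ∈ l, ∃ b ∈ values, a + b ≤ max_sum ∧ v = a + b := by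
  induction l generalizing st with
  | nil => simp
  | cons x t ih =>
    rw [List.foldl_cons, ih, mem_innerB max_sum x values st hs]
    constructor
    · rintro ((hv | ⟨b, hb, hle, rfl⟩) | ⟨a, ha, b, hb, hle, rfl⟩)
      · exact Or.inl hv
      · exact Or.inr ⟨x, List.mem_cons_self, b, hb, hle, rfl⟩
      · exact Or.inr ⟨a, List.mem_cons_of_mem _ ha, b, hb, hle, rfl⟩
    · rintro (hv | ⟨a, ha, b, hb, hle, rfl⟩)
      · exact Or.inl (Or.inl hv)
      · rcases List.mem_cons.mp ha with rfl | ha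
        · exact Or.inl (Or.inr ⟨b, hb, hle, rfl⟩)
        · exact Or.inr ⟨a, ha, b, hb, hle, rfl⟩

theorem inv_outerB (max_sum : Int) (values l : List Int) (st : PySem.Set Int × Int)
    (h1 : st.1.Nodup) (h2 : st.2 = st.1.sum) :
    (l.foldl (fun st x => pvInnerB max_sum x values st) st).1.Nodup ∧
      (l.foldl (fun st x => pvInnerB max_sum x values st) st).2
        = (l.foldl (fun st x => pvInnerB max_sum x values st) st).1.sum := by
  induction l generalizing st with
  | nil => exact ⟨h1, h2⟩
  | cons x t ih =>
    rw [List.foldl_cons]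
    rcases inv_innerB max_sum x values st h1 h2 with ⟨n1, n2⟩
    exact ih _ n1 n2

theorem main_eq (max_sum : Int) (c : List Int) :
    Spec_sum_of_all_positive_integers_that_are_sum_of_candidates max_sum c
      (sum_of_all_positive_integers_that_are_sum_of_candidates max_sum c) := by
  unfold Spec_sum_of_all_positive_integers_that_are_sum_of_candidates
  rw [A_eq_goA]
  simp only [sum_of_all_positive_integers_that_are_sum_of_candidates_alt]
  set values := PySem.List.sorted (PySem.Set.ofList c) (fun v => v) false with hv
  have hpair : values.Pairwise (· ≤ ·) := by
    simpa using PySem.List.sorted_pairwise (PySem.Set.ofList c) (fun v => v)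
  have hvmem : ∀ v : Int, v ∈ values ↔ v ∈ c := by
    intro v
    rw [hv, PySem.List.mem_sorted, PySem.Set.mem_ofList]
  set res := values.foldl (fun st x => pvInnerB max_sum x values st)
    ((PySem.Set.empty : PySem.Set Int), 0) with hres
  have hinv := inv_outerB max_sum values values ((PySem.Set.empty : PySem.Set Int), 0)
    (by simp [PySem.Set.empty]) (by simp [PySem.Set.empty])
  rw [← hres] at hinv
  have hperm : (pvGoA max_sum c PySem.Set.empty).Perm res.1 := by
    rw [List.perm_ext_iff_of_nodup (nodup_goA max_sum c _ (by simp [PySem.Set.empty])) hinv.1]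
    intro v
    rw [mem_goA, mem_outerB max_sum values values _ hpair]
    simp only [PySem.Set.empty, List.not_mem_nil, false_or]
    constructor
    · rintro ⟨a, ha, b, hb, hle, rfl⟩
      exact ⟨a, (hvmem a).mpr ha, b, (hvmem b).mpr hb, hle, rfl⟩
    · rintro ⟨a, ha, b, hb, hle, rfl⟩
      exact ⟨a, (hvmem a).mp ha, b, (hvmem b).mp hb, hle, rfl⟩
  rw [hperm.sum_eq, hinv.2]


-- ===== VERDICT (by name: the statement is the Claim_ definition above) =====
theorem sum_of_all_positive_integers_that_are_sum_of_candidates_spec : Claim_equal_sum_of_all_positive_integers_that_are_sum_of_candidates := by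
  intro max_sum c _
  exact main_eq max_sum c
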